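-- pv_equiv track=rewrite | github.com/tmwgsicp/StreamVault-Pro | app/ui/views/transcripts_view.py | _extract_text_from_vtt
-- ===== SOURCE A (Python) =====
-- def _extract_text_from_vtt(vtt_content: str) -> str:
--     """从VTT字幕文件中提取纯文本"""
--     lines = vtt_content.split('\n')
--     text_lines = []
--     skip_header = True
--
--     for line in lines:
--         line = line.strip()
--         # 跳过WebVTT头部
--         if skip_header and (line.startswith('WEBVTT') or line.startswith('NOTE') or not line):
--             continue
--         skip_header = False
--
--         if '-->' in line or not line:
--             continue
--         text_lines.append(line)
--
--     return '\n'.join(text_lines)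
-- ===== SOURCE B (Python) =====
-- def _extract_text_from_vtt(vtt_content: str) -> str:
--     """从VTT字幕文件中提取纯文本"""
--     lines = [l.strip() for l in vtt_content.split('\n')]
--     # drop the leading header block (blank / WEBVTT / NOTE lines)
--     while lines and (not lines[0] or lines[0].startswith('WEBVTT') or lines[0].startswith('NOTE')):
--         lines = lines[1:]
--     return '\n'.join(l for l in lines if l and '-->' not in l)
-- ===== Notes on version B (the rewrite author's own statement) =====
-- stated objective: idiomatic
-- what changed: Replaces A's single stateful loop with a skip_header flag by two explicit phases: strip all lines, drop the leading header block (blank/WEBVTT/NOTE lines), then filter the remainder for non-empty non-timestamp lines.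
import Mathlib
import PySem

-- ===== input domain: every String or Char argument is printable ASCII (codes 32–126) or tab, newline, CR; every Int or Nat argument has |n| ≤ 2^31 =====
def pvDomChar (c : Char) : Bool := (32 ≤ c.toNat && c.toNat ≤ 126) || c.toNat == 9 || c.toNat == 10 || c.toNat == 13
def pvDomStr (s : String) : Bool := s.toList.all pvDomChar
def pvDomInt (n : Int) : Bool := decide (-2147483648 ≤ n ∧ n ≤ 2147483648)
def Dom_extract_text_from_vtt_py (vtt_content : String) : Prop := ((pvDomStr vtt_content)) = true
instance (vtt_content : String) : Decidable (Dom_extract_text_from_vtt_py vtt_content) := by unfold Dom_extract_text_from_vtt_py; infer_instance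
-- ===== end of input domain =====

-- B replaces A's stateful skip_header flag loop by two explicit phases — drop the leading
-- header block, then filter the remainder — for clarity (idiomatic decomposition, same cost).

-- ===== PORT A =====
-- A's loop body: state = (text_lines, skip_header)
def vttStepA (st : List String × Bool) (line0 : String) : List String × Bool :=
  let line := PySem.Str.strip line0
  if st.2 && (PySem.Str.startswith line "WEBVTT" || PySem.Str.startswith line "NOTE" || line == "") then
    st
  else
    if PySem.Str.isIn "-->" line || line == "" then (st.1, false)
    else (st.1 ++ [line], false)

def extract_text_from_vtt_py (vtt_content : String) : String :=
  let lines := (PySem.Str.split? vtt_content "\n").getD []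
  PySem.Str.join "\n" (lines.foldl vttStepA ([], true)).1

-- ===== PORT B =====
def extract_text_from_vtt_py_alt (vtt_content : String) : String :=
  let lines := ((PySem.Str.split? vtt_content "\n").getD []).map PySem.Str.strip
  let body := lines.dropWhile (fun l =>
    l == "" || PySem.Str.startswith l "WEBVTT" || PySem.Str.startswith l "NOTE")
  PySem.Str.join "\n" (body.filter (fun l => !(l == "") && !(PySem.Str.isIn "-->" l)))

-- ===== PRECONDITION & SPEC =====
def Spec_extract_text_from_vtt_py (vtt_content : String) (out : String) : Prop := out = extract_text_from_vtt_py_alt vtt_content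
instance (vtt_content : String) (out : String) : Decidable (Spec_extract_text_from_vtt_py vtt_content out) := by unfold Spec_extract_text_from_vtt_py; infer_instance

-- ===== CLAIM (what is proved, stated in full; the proofs are below) =====
def Claim_equal_extract_text_from_vtt_py : Prop := ∀ (vtt_content : String), Dom_extract_text_from_vtt_py vtt_content → Spec_extract_text_from_vtt_py vtt_content (extract_text_from_vtt_py vtt_content)

-- ===== LEMMAS AND PROOFS =====

-- A's loop step, abstracted over the header test p, the drop test q and the per-line map f
def vttStepG (p q : String → Bool) (f : String → String) (st : List String × Bool)
    (line0 : String) : List String × Bool :=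
  let line := f line0
  if st.2 && p line then st
  else if q line then (st.1, false) else (st.1 ++ [line], false)

lemma stepA_eq_stepG : vttStepA = vttStepG
    (fun l => PySem.Str.startswith l "WEBVTT" || PySem.Str.startswith l "NOTE" || (l == ""))
    (fun l => PySem.Str.isIn "-->" l || (l == "")) PySem.Str.strip := rfl

-- once the flag is false, the loop is exactly a filter over the mapped lines
lemma foldG_false (p q : String → Bool) (f : String → String) (lines acc : List String) :
    (lines.foldl (vttStepG p q f) (acc, false)).1 = acc ++ (lines.map f).filter (fun l => !q l) := by
  induction lines generalizing acc with
  | nil => simp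
  | cons l rest ih =>
    by_cases hq : q (f l) <;> simp [vttStepG, hq, ih]

-- while the flag is true, the loop first drops exactly the leading p-block
lemma foldG_true (p q : String → Bool) (f : String → String) (lines : List String) :
    (lines.foldl (vttStepG p q f) ([], true)).1 =
      ((lines.map f).dropWhile (fun l => p l)).filter (fun l => !q l) := by
  induction lines with
  | nil => simp
  | cons l rest ih =>
    by_cases hp : p (f l)
    · simpa [vttStepG, hp] using ih
    · by_cases hq : q (f l) <;>
        simp [vttStepG, hp, hq, foldG_false]

-- B's two predicates agree (up to disjunct order / De Morgan) with A's tests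
lemma hdr_pred_eq :
    (fun l => l == "" || PySem.Str.startswith l "WEBVTT" || PySem.Str.startswith l "NOTE") =
      (fun l => PySem.Str.startswith l "WEBVTT" || PySem.Str.startswith l "NOTE" || (l == "")) := by
  funext l
  cases h1 : (l == "") <;> cases h2 : PySem.Str.startswith l "WEBVTT" <;>
    cases h3 : PySem.Str.startswith l "NOTE" <;> rfl

lemma keep_pred_eq :
    (fun l => !(l == "") && !(PySem.Str.isIn "-->" l)) =
      (fun l => !(PySem.Str.isIn "-->" l || (l == ""))) := by
  funext l
  cases h1 : (l == "") <;> cases h2 : PySem.Str.isIn "-->" l <;> rfl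

-- ===== VERDICT (by name: the statement is the Claim_ definition above) =====
theorem extract_text_from_vtt_py_spec : Claim_equal_extract_text_from_vtt_py := by
  intro v _
  show PySem.Str.join "\n" (((PySem.Str.split? v "\n").getD []).foldl vttStepA ([], true)).1 = _
  rw [stepA_eq_stepG, foldG_true]
  show _ = PySem.Str.join "\n"
    (((((PySem.Str.split? v "\n").getD []).map PySem.Str.strip).dropWhile (fun l =>
        l == "" || PySem.Str.startswith l "WEBVTT" || PySem.Str.startswith l "NOTE")).filter
      (fun l => !(l == "") && !(PySem.Str.isIn "-->" l)))
  rw [hdr_pred_eq, keep_pred_eq]
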